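-- pv_equiv track=rewrite | github.com/binh-vu/kgdata | kgdata/dbpedia/datasets/entity_all_types.py | merge_type_dist
-- ===== SOURCE A (Python) =====
-- from typing import Iterable, Optional
--
-- def merge_type_dist(it: Iterable[dict[str, int]]) -> dict[str, int]:
--     o = {}
--     for dist in it:
--         for k, v in dist.items():
--             if k not in o:
--                 o[k] = v
--             elif v < o[k]:
--                 o[k] = v
--     return o
-- ===== SOURCE B (Python) =====
-- def merge_type_dist(it):
--     # Collect every observed value per key first, then reduce each group with min.
--     groups = {}
--     for dist in it:
--         for k, v in dist.items():
--             groups.setdefault(k, []).append(v)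
--     return {k: min(vs) for k, vs in groups.items()}
-- ===== Notes on version B (the rewrite author's own statement) =====
-- stated objective: alternative
-- what changed: Replaced A's running-min accumulator dict with a collect-then-reduce structure: one pass groups all values per key into lists, a second pass maps min over the groups.
import Mathlib
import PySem

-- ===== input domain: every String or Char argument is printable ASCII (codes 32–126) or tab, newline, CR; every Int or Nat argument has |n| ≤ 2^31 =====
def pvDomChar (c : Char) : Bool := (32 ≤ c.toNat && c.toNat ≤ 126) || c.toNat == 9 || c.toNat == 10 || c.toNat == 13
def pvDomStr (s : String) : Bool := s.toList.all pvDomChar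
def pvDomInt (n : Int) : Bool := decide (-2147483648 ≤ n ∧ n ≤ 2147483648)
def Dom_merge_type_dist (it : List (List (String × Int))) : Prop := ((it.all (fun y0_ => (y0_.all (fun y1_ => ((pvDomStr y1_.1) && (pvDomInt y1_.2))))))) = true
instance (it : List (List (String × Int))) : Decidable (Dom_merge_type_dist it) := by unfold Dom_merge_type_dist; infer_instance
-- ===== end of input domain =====

-- B (collect values per key, then take min per group) ≡ A (running-min dict); same asymptotic cost, different decomposition.

-- ===== PORT A =====
def merge_type_dist (it : List (List (String × Int))) : List (String × Int) :=
  (it.foldl (fun o dist =>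
      dist.foldl (fun o kv =>
        if o.contains kv.1 = false then o.insert kv.1 kv.2
        else if kv.2 < o.getD kv.1 0 then o.insert kv.1 kv.2
        else o) o)
    PySem.Dict.empty).items

-- ===== PORT B =====
-- Python's builtin min over a nonempty int list (B never calls it on []).
def pymin (vs : List Int) : Int :=
  match vs with
  | [] => 0
  | h :: t => t.foldl min h

def merge_type_dist_alt (it : List (List (String × Int))) : List (String × Int) :=
  let groups := it.foldl (fun g dist =>
      dist.foldl (fun g kv => g.modify kv.1 [] (· ++ [kv.2])) g)
    PySem.Dict.empty
  groups.items.map (fun p => (p.1, pymin p.2))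

-- ===== PRECONDITION & SPEC =====
def Spec_merge_type_dist (it : List (List (String × Int))) (out : List (String × Int)) : Prop := out = merge_type_dist_alt it
instance (it : List (List (String × Int))) (out : List (String × Int)) : Decidable (Spec_merge_type_dist it out) := by unfold Spec_merge_type_dist; infer_instance

-- ===== CLAIM (what is proved, stated in full; the proofs are below) =====
def Claim_equal_merge_type_dist : Prop := ∀ (it : List (List (String × Int))), Dom_merge_type_dist it → Spec_merge_type_dist it (merge_type_dist it)

-- ===== LEMMAS AND PROOFS =====

def fmin (p : String × List Int) : String × Int := (p.1, pymin p.2)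

theorem pymin_append_singleton (vs : List Int) (v : Int) (h : vs ≠ []) :
    pymin (vs ++ [v]) = min (pymin vs) v := by
  cases vs with
  | nil => exact absurd rfl h
  | cons a t => simp [pymin, List.foldl_append]

theorem get?_mk_map_fmin (l : List (String × List Int)) (k : String) :
    (PySem.Dict.mk (l.map fmin)).get? k = Option.map pymin ((PySem.Dict.mk l).get? k) := by
  induction l with
  | nil => simp [PySem.Dict.get?]
  | cons p t ih =>
      obtain ⟨a, b⟩ := p
      cases hk : (a == k) with
      | true => simp [PySem.Dict.get?_mk_cons, fmin, hk]
      | false => simp [PySem.Dict.get?_mk_cons, fmin, hk, ih]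

theorem keys_of_items_map_fmin (oA : PySem.Dict String Int) (g : PySem.Dict String (List Int))
    (h : oA.items = g.items.map fmin) : oA.keys = g.keys := by
  simp only [PySem.Dict.keys, h, List.map_map]
  rfl

theorem loop_items :
    ∀ (l : List (String × Int)) (oA : PySem.Dict String Int) (g : PySem.Dict String (List Int)),
    oA.items = g.items.map fmin → g.keys.Nodup → (∀ p ∈ g.items, p.2 ≠ []) →
    (l.foldl (fun o kv =>
        if o.contains kv.1 = false then o.insert kv.1 kv.2
        else if kv.2 < o.getD kv.1 0 then o.insert kv.1 kv.2
        else o) oA).items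
      = ((l.foldl (fun g kv => g.modify kv.1 [] (· ++ [kv.2])) g).items).map fmin := by
  intro l
  induction l with
  | nil => intro oA g h _ _; simpa using h
  | cons kv t ih =>
      intro oA g h hnd hne
      obtain ⟨k, v⟩ := kv
      simp only [List.foldl_cons]
      have hkeys : oA.keys = g.keys := keys_of_items_map_fmin oA g h
      have hcont : oA.contains k = g.contains k := by
        simp [PySem.Dict.contains_eq_decide_mem_keys, hkeys]
      by_cases hc : g.contains k = true
      · -- key already present
        have hsome : ∃ vs, g.get? k = some vs := by
          have := PySem.Dict.contains_eq_isSome_get? g k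
          rw [hc] at this
          exact Option.isSome_iff_exists.mp this.symm
        obtain ⟨vs, hvs⟩ := hsome
        have hvsne : vs ≠ [] := hne _ (PySem.Dict.mem_items_of_get?_eq_some g hvs)
        have hgetA : oA.get? k = some (pymin vs) := by
          have : oA = PySem.Dict.mk (g.items.map fmin) := PySem.Dict.ext h
          rw [this, get?_mk_map_fmin]
          have : g = PySem.Dict.mk g.items := rfl
          rw [← this, hvs]; rfl
        have hgetDA : oA.getD k 0 = pymin vs := PySem.Dict.getD_of_get?_eq_some oA 0 hgetA
        have hgetDg : g.getD k [] = vs := PySem.Dict.getD_of_get?_eq_some g [] hvs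
        have hcA : oA.contains k = true := hcont.trans hc
        -- step on g: insert k (vs ++ [v])
        have hmod : g.modify k [] (· ++ [v]) = g.insert k (vs ++ [v]) := by
          simp [PySem.Dict.modify, hgetDg]
        have hitemsG : (g.insert k (vs ++ [v])).items
            = g.items.map (fun p => if p.1 == k then (k, vs ++ [v]) else p) :=
          PySem.Dict.items_insert_of_contains g _ hc
        have hval : ∀ p ∈ g.items, p.1 = k → p.2 = vs := by
          intro p hp hpk
          have : g.get? p.1 = some p.2 := PySem.Dict.get?_of_mem_items g (by exact hp) hnd
          rw [hpk, hvs] at this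
          exact (Option.some_inj.mp this).symm
        have hstep :
            (if oA.contains k = false then oA.insert k v
             else if v < oA.getD k 0 then oA.insert k v else oA).items
            = ((g.modify k [] (· ++ [v])).items).map fmin := by
          have hnotf : ¬ oA.contains k = false := by simp [hcA]
          rw [hmod, hitemsG]
          simp only [List.map_map]
          rw [if_neg hnotf, hgetDA]
          by_cases hlt : v < pymin vs
          · rw [if_pos hlt, PySem.Dict.items_insert_of_contains oA v hcA, h, List.map_map]
            apply List.map_congr_left
            intro p hp
            by_cases hpk : p.1 = k
            · have hpv := hval p hp hpk
              simp [Function.comp, fmin, hpk, hpv,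
                pymin_append_singleton vs v hvsne, min_eq_right_of_lt, hlt]
            · simp [Function.comp, fmin, hpk]
          · rw [if_neg hlt, h]
            apply List.map_congr_left
            intro p hp
            by_cases hpk : p.1 = k
            · have hpv := hval p hp hpk
              have : pymin (vs ++ [v]) = pymin vs := by
                rw [pymin_append_singleton vs v hvsne]
                exact min_eq_left (le_of_not_gt hlt)
              simp [Function.comp, fmin, hpk, hpv, this]
            · simp [Function.comp, fmin, hpk]
        -- invariants for the new dicts
        have hnd' : (g.modify k [] (· ++ [v])).keys.Nodup := by
          rw [hmod]
          exact PySem.Dict.nodup_keys_insert g k _ hnd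
        have hne' : ∀ p ∈ (g.modify k [] (· ++ [v])).items, p.2 ≠ [] := by
          rw [hmod, hitemsG]
          intro p hp
          obtain ⟨q, hq, hqe⟩ := List.mem_map.mp hp
          by_cases hqk : q.1 = k
          · simp only [hqk, beq_self_eq_true, if_pos] at hqe
            rw [← hqe]; simp
          · simp only [ne_eq] at hqk ⊢
            rw [if_neg (by simpa using hqk)] at hqe
            rw [← hqe]; exact hne q hq
        exact (by
          have := ih _ _ hstep hnd' hne'
          convert this using 2)
      · -- fresh key
        have hcf : g.contains k = false := by simpa using hc
        have hcAf : oA.contains k = false := hcont.trans hcf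
        have hgetDg : g.getD k [] = [] := PySem.Dict.getD_of_not_contains g [] hcf
        have hmod : g.modify k [] (· ++ [v]) = g.insert k [v] := by
          simp [PySem.Dict.modify, hgetDg]
        have hstep :
            (if oA.contains k = false then oA.insert k v
             else if v < oA.getD k 0 then oA.insert k v else oA).items
            = ((g.modify k [] (· ++ [v])).items).map fmin := by
          rw [hmod, if_pos hcAf,
PySem.Dict.items_insert_of_not_contains oA v hcAf,
              PySem.Dict.items_insert_of_not_contains g _ hcf, List.map_append, ← h]
          rfl
        have hnd' : (g.modify k [] (· ++ [v])).keys.Nodup := by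
          rw [hmod]
          exact PySem.Dict.nodup_keys_insert g k _ hnd
        have hne' : ∀ p ∈ (g.modify k [] (· ++ [v])).items, p.2 ≠ [] := by
          rw [hmod, PySem.Dict.items_insert_of_not_contains g _ hcf]
          intro p hp
          rcases List.mem_append.mp hp with hp' | hp'
          · exact hne p hp'
          · simp at hp'; rw [hp']; simp
        exact (by
          have := ih _ _ hstep hnd' hne'
          convert this using 2)

-- ===== VERDICT (by name: the statement is the Claim_ definition above) =====
theorem merge_type_dist_spec : Claim_equal_merge_type_dist := by
  intro it _
  unfold Spec_merge_type_dist merge_type_dist merge_type_dist_alt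
  rw [← List.foldl_flatten, ← List.foldl_flatten]
  exact loop_items it.flatten PySem.Dict.empty PySem.Dict.empty (by rfl)
    (by simp [PySem.Dict.keys_empty]) (by simp [PySem.Dict.empty])
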